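-- pv_equiv track=rewrite | github.com/boomytc/BoomTools | AI/CommentTranslate/utils/comment_parser.py | split_at_statement_boundaries
-- ===== SOURCE A (Python) =====
-- def split_at_statement_boundaries(text, max_size):
--     """
--     在语句边界拆分文本
--
--     Args:
--         text: 要拆分的文本
--         max_size: 每个块的最大大小
--
--     Returns:
--         list: 拆分后的文本块列表
--     """
--     if len(text) <= max_size:
--         return [text]
--
--     chunks = []
--     start = 0
--
--     while start < len(text):
--         end = min(start + max_size, len(text))
--
--         # 如果不是文本末尾，尝试找到合适的分割点
--         if end < len(text):
--             # 尝试在分号、右花括号后的换行处分割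
--             candidates = [
--                 text.rfind(';\n', start, end),
--                 text.rfind('}\n', start, end),
--                 text.rfind('\n', start, end)
--             ]
--
--             # 选择最靠近 end 的有效分割点
--             split_point = max([p for p in candidates if p != -1] or [start])
--
--             if split_point > start:
--                 end = split_point + 1  # +1 to include the delimiter
--             # 如果没有找到合适的分割点，就在 max_size 处强制分割
--
--         chunks.append(text[start:end])
--         start = end
--
--     return chunks
-- ===== SOURCE B (Python) =====
-- def split_at_statement_boundaries(text, max_size):
--     n = len(text)
--     if n <= max_size:
--         return [text]
--     # positions of every newline, computed once; the greedy loop then walks a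
--     # single monotone pointer j through them instead of rescanning each window
--     nls = [i for i, c in enumerate(text) if c == '\n']
--     chunks = []
--     start = 0
--     j = 0
--     while start < n:
--         end = min(start + max_size, n)
--         if end < n:
--             while j < len(nls) and nls[j] < end:
--                 j += 1
--             if j > 0 and nls[j - 1] > start:
--                 end = nls[j - 1] + 1
--         chunks.append(text[start:end])
--         start = end
--     return chunks
-- ===== Notes on version B (the rewrite author's own statement) =====
-- stated objective: alternative
-- what changed: All newline positions are precomputed once and the greedy loop walks a single monotone pointer through that list, replacing A's three backward rfind window scans per chunk (whose max is always the plain newline rfind).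
import Mathlib
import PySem

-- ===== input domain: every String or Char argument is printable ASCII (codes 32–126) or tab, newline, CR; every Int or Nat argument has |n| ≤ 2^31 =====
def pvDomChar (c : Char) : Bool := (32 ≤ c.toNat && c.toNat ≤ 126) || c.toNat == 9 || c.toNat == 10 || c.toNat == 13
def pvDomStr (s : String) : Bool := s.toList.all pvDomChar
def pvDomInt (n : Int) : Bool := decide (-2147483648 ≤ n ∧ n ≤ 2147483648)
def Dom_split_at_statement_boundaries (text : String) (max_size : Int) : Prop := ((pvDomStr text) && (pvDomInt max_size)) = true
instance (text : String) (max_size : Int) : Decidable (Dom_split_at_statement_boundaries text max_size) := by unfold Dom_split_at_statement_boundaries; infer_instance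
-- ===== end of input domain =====

-- B precomputes every newline position once and advances one monotone pointer through
-- them instead of A's per-chunk backward rfind scans; equivalence is proved on all
-- inputs where A terminates (max_size >= 1, or empty text).


-- ===== PORT A =====
-- the body of A's `if end < len(text)` branch: the three rfind candidates, the max of
-- the valid ones (or start), and the resulting end
def pvEndA (cs : List Char) (start e0 : Int) : Int :=
  let candidates : List Int :=
    [PySem.Chars.rfindFrom cs [';', '\n'] start (some e0),
     PySem.Chars.rfindFrom cs ['}', '\n'] start (some e0),
     PySem.Chars.rfindFrom cs ['\n'] start (some e0)]
  let valid := candidates.filter (fun p => !(p == -1))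
  let sp := (PySem.List.max? (if valid.isEmpty then [start] else valid) id).getD start
  if sp > start then sp + 1 else e0

-- A's while loop; fuel = cs.length + 1 suffices whenever the Python loop terminates
def pvLoopA (cs : List Char) (maxs : Int) : Nat → Int → List (List Char) → List (List Char)
  | 0, _, chunks => chunks
  | fuel+1, start, chunks =>
    if start < (cs.length : Int) then
      let e0 : Int := min (start + maxs) (cs.length : Int)
      let e : Int := if e0 < (cs.length : Int) then pvEndA cs start e0 else e0
      pvLoopA cs maxs fuel e (chunks ++ [PySem.List.slice cs (some start) (some e)])
    else chunks

def split_at_statement_boundaries (text : String) (max_size : Int) : List String :=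
  let cs := text.toList
  if (PySem.Chars.len cs : Int) ≤ max_size then [text]
  else (pvLoopA cs max_size (cs.length + 1) 0 []).map String.ofList

-- ===== PORT B =====
-- Source B's inner `while j < len(nls) and nls[j] < end: j += 1` (index j is always in range,
-- so `List.getD` is exact for Python's nls[j])
def pvAdvanceJ (nls : List Int) (e : Int) (j : Nat) : Nat :=
  if h : j < nls.length ∧ nls.getD j 0 < e then pvAdvanceJ nls e (j+1) else j
  termination_by nls.length - j
  decreasing_by omega

-- the body of Source B's `if end < n` branch, after the pointer has advanced to j'
def pvEndB (nls : List Int) (start e0 : Int) (j' : Nat) : Int :=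
  if 0 < j' ∧ start < nls.getD (j'-1) 0 then nls.getD (j'-1) 0 + 1 else e0

-- Source B: nls = [i for i, c in enumerate(text) if c == '\n']
def pvNls (cs : List Char) : List Int :=
  ((PySem.List.enumerate cs 0).filter (fun p => p.2 == '\n')).map (·.1)

-- Source B's outer while loop, carrying the monotone pointer j
def pvLoopB (cs : List Char) (maxs : Int) (nls : List Int) : Nat → Int → Nat → List (List Char) → List (List Char)
  | 0, _, _, chunks => chunks
  | fuel+1, start, j, chunks =>
    if start < (cs.length : Int) then
      let e0 : Int := min (start + maxs) (cs.length : Int)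
      if e0 < (cs.length : Int) then
        let j' := pvAdvanceJ nls e0 j
        let e : Int := pvEndB nls start e0 j'
        pvLoopB cs maxs nls fuel e j' (chunks ++ [PySem.List.slice cs (some start) (some e)])
      else
        pvLoopB cs maxs nls fuel e0 j (chunks ++ [PySem.List.slice cs (some start) (some e0)])
    else chunks

def split_at_statement_boundaries_alt (text : String) (max_size : Int) : List String :=
  let cs := text.toList
  if (PySem.Chars.len cs : Int) ≤ max_size then [text]
  else (pvLoopB cs max_size (pvNls cs) (cs.length + 1) 0 0 []).map String.ofList

-- ===== PRECONDITION & SPEC =====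
-- Pre_ excludes exactly the inputs where A's while loop never terminates (so A never
-- returns): a nonempty text with max_size ≤ 0 makes end = start and the loop spins.
def Pre_split_at_statement_boundaries (text : String) (max_size : Int) : Prop :=
  1 ≤ max_size ∨ text = ""
instance (text : String) (max_size : Int) : Decidable (Pre_split_at_statement_boundaries text max_size) := by unfold Pre_split_at_statement_boundaries; infer_instance

def pvWitness_split_at_statement_boundaries : String × Int := ("ab;\ncd\ne", 4)

def Spec_split_at_statement_boundaries (text : String) (max_size : Int) (out : List String) : Prop := out = split_at_statement_boundaries_alt text max_size
instance (text : String) (max_size : Int) (out : List String) : Decidable (Spec_split_at_statement_boundaries text max_size out) := by unfold Spec_split_at_statement_boundaries; infer_instance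

-- ===== CLAIM (what is proved, stated in full; the proofs are below) =====
def Claim_equal_split_at_statement_boundaries : Prop := ∀ (text : String) (max_size : Int), Dom_split_at_statement_boundaries text max_size → Pre_split_at_statement_boundaries text max_size → Spec_split_at_statement_boundaries text max_size (split_at_statement_boundaries text max_size)

-- ===== LEMMAS AND PROOFS =====

-- characterisation of PySem.Chars.rfind.go (no spec lemma for it in the prelude)
theorem pvGo_ge (s sub : List Char) (j i : Nat) (hij : i ≤ j)
    (h : sub <+: s.drop i) : (i:Int) ≤ PySem.Chars.rfind.go s sub j := by
  induction j with
  | zero =>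
    have h0 : i = 0 := by omega
    subst h0
    simp only [PySem.Chars.rfind.go]
    rw [if_pos (by simpa [List.isPrefixOf_iff_prefix] using h)]
    simp
  | succ j ih =>
    simp only [PySem.Chars.rfind.go]
    rcases Nat.lt_or_ge i (j+1) with hlt | hge
    · split
      · push_cast; omega
      · exact ih (by omega)
    · have hi : i = j + 1 := by omega
      subst hi
      rw [if_pos (by simpa [List.isPrefixOf_iff_prefix] using h)]

theorem pvGo_prefix (s sub : List Char) (j : Nat) (h : PySem.Chars.rfind.go s sub j ≠ -1) :
    ∃ k : Nat, PySem.Chars.rfind.go s sub j = (k:Int) ∧ k ≤ j ∧ sub <+: s.drop k := by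
  induction j with
  | zero =>
    simp only [PySem.Chars.rfind.go] at h ⊢
    split at h
    case isTrue hp =>
      exact ⟨0, by rw [if_pos hp]; simp, le_refl 0,
        by simpa [List.isPrefixOf_iff_prefix] using hp⟩
    case isFalse => simp at h
  | succ j ih =>
    simp only [PySem.Chars.rfind.go] at h ⊢
    split at h
    case isTrue hp =>
      exact ⟨j+1, by rw [if_pos hp], le_refl _,
        by simpa [List.isPrefixOf_iff_prefix] using hp⟩
    case isFalse hp =>
      obtain ⟨k, hk1, hk2, hk3⟩ := ih h
      exact ⟨k, by rw [if_neg hp]; exact hk1, by omega, hk3⟩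

-- rfindFrom with in-range bounds is rfind on the window
theorem pvRfindFrom_window (cs sub : List Char) (start e : Int) (h0 : 0 ≤ start)
    (hse : start ≤ e) (hen : e ≤ (cs.length : Int)) :
    PySem.Chars.rfindFrom cs sub start (some e) =
      (if PySem.Chars.rfind ((cs.take e.toNat).drop start.toNat) sub = -1 then -1
       else start + PySem.Chars.rfind ((cs.take e.toNat).drop start.toNat) sub) := by
  show (let e' := if (cs.length:Int) < e then (cs.length:Int) else if e < 0 then (if e + cs.length < 0 then 0 else e + cs.length) else e
        let st := if start < 0 then (if start + cs.length < 0 then 0 else start + cs.length) else start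
        if e' < st then -1
        else
          let r := PySem.Chars.rfind ((cs.take e'.toNat).drop st.toNat) sub
          if r = -1 then -1 else st + r) = _
  have he' : (if (cs.length:Int) < e then (cs.length:Int) else if e < 0 then (if e + cs.length < 0 then 0 else e + cs.length) else e) = e := by
    rw [if_neg (by omega), if_neg (by omega)]
  have hst : (if start < 0 then (if start + (cs.length:Int) < 0 then 0 else start + cs.length) else start) = start := if_neg (by omega)
  simp only [he', hst]
  rw [if_neg (by omega : ¬ e < start)]

theorem pvWindow_getElem? (cs : List Char) (start e : Int) (h0 : 0 ≤ start)
    (hen : e ≤ (cs.length : Int)) (i : Nat) :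
    ((cs.take e.toNat).drop start.toNat)[i]? =
      if (start + i : Int) < e then cs[(start.toNat + i)]? else none := by
  rw [List.getElem?_drop, List.getElem?_take]
  split_ifs with h1 h2 h2 <;> try rfl
  · omega
  · omega

theorem pvSingleton_prefix_iff (w : List Char) (c : Char) (i : Nat) :
    ([c] <+: w.drop i) ↔ w[i]? = some c := by
  rw [← List.head?_drop]
  cases h : w.drop i <;> simp [eq_comm]

theorem pvNl_pos (cs : List Char) (start e : Int) (h0 : 0 ≤ start) (hse : start ≤ e)
    (hen : e ≤ (cs.length : Int))
    (h : PySem.Chars.rfindFrom cs ['\n'] start (some e) ≠ -1) :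
    ∃ p : Nat, PySem.Chars.rfindFrom cs ['\n'] start (some e) = (p:Int) ∧
      start ≤ (p:Int) ∧ (p:Int) < e ∧ cs[p]? = some '\n' ∧
      ∀ q : Nat, (p:Int) < (q:Int) → (q:Int) < e → cs[q]? ≠ some '\n' := by
  rw [pvRfindFrom_window cs _ start e h0 hse hen] at h ⊢
  set w := (cs.take e.toNat).drop start.toNat with hw
  by_cases hr : PySem.Chars.rfind w ['\n'] = -1
  · simp [hr] at h
  rw [if_neg hr] at h ⊢
  have hgo : PySem.Chars.rfind w ['\n'] = PySem.Chars.rfind.go w ['\n'] w.length := rfl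
  rw [hgo] at hr ⊢
  obtain ⟨k, hk1, hk2, hk3⟩ := pvGo_prefix w ['\n'] w.length hr
  have hwk : w[k]? = some '\n' := (pvSingleton_prefix_iff w '\n' k).mp hk3
  rw [hw, pvWindow_getElem? cs start e h0 hen k] at hwk
  have hke : (start + k : Int) < e := by by_contra hc; rw [if_neg hc] at hwk; simp at hwk
  rw [if_pos hke] at hwk
  refine ⟨start.toNat + k, by rw [hk1]; push_cast; omega, by push_cast; omega, by push_cast; omega, hwk, ?_⟩
  intro q hq1 hq2 hnlq
  have hqs : start.toNat + (q - start.toNat) = q := by push_cast at hq1 ⊢; omega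
  have hwi : w[q - start.toNat]? = some '\n' := by
    rw [hw, pvWindow_getElem? cs start e h0 hen _, hqs, if_pos (by push_cast at hq1 ⊢; omega)]
    exact hnlq
  have hilt : q - start.toNat < w.length := (List.getElem?_eq_some_iff.mp hwi).1
  have hge := pvGo_ge w ['\n'] w.length (q - start.toNat) (le_of_lt hilt)
    ((pvSingleton_prefix_iff w '\n' _).mpr hwi)
  rw [← hgo] at hge hk1
  rw [hk1] at hge
  push_cast at hq1 hge
  omega

theorem pvNl_neg (cs : List Char) (start e : Int) (h0 : 0 ≤ start) (hse : start ≤ e)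
    (hen : e ≤ (cs.length : Int))
    (h : PySem.Chars.rfindFrom cs ['\n'] start (some e) = -1) :
    ∀ q : Nat, start ≤ (q:Int) → (q:Int) < e → cs[q]? ≠ some '\n' := by
  intro q hq1 hq2 hnlq
  rw [pvRfindFrom_window cs _ start e h0 hse hen] at h
  set w := (cs.take e.toNat).drop start.toNat with hw
  by_cases hr : PySem.Chars.rfind w ['\n'] = -1
  · have hqs : start.toNat + (q - start.toNat) = q := by omega
    have hwi : w[q - start.toNat]? = some '\n' := by
      rw [hw, pvWindow_getElem? cs start e h0 hen _, hqs, if_pos (by push_cast; omega)]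
      exact hnlq
    have hilt : q - start.toNat < w.length := (List.getElem?_eq_some_iff.mp hwi).1
    have hge := pvGo_ge w ['\n'] w.length (q - start.toNat) (le_of_lt hilt)
      ((pvSingleton_prefix_iff w '\n' _).mpr hwi)
    have : PySem.Chars.rfind w ['\n'] = PySem.Chars.rfind.go w ['\n'] w.length := rfl
    rw [← this] at hge
    omega
  · rw [if_neg hr] at h
    have hgo : PySem.Chars.rfind w ['\n'] = PySem.Chars.rfind.go w ['\n'] w.length := rfl
    obtain ⟨k, hk1, hk2, hk3⟩ := pvGo_prefix w ['\n'] w.length (hgo ▸ hr)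
    rw [hgo, hk1] at h
    omega

theorem pvTwo_lt (cs : List Char) (a : Char) (start e : Int) (h0 : 0 ≤ start)
    (hse : start ≤ e) (hen : e ≤ (cs.length : Int))
    (h : PySem.Chars.rfindFrom cs [a, '\n'] start (some e) ≠ -1) :
    PySem.Chars.rfindFrom cs ['\n'] start (some e) ≠ -1 ∧
    PySem.Chars.rfindFrom cs [a, '\n'] start (some e) <
      PySem.Chars.rfindFrom cs ['\n'] start (some e) := by
  rw [pvRfindFrom_window cs _ start e h0 hse hen] at h ⊢
  rw [pvRfindFrom_window cs _ start e h0 hse hen]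
  set w := (cs.take e.toNat).drop start.toNat with hw
  by_cases hr : PySem.Chars.rfind w [a, '\n'] = -1
  · simp [hr] at h
  rw [if_neg hr] at h ⊢
  have hgo : PySem.Chars.rfind w [a, '\n'] = PySem.Chars.rfind.go w [a, '\n'] w.length := rfl
  obtain ⟨k, hk1, hk2, hk3⟩ := pvGo_prefix w [a, '\n'] w.length (hgo ▸ hr)
  obtain ⟨t, ht⟩ := hk3
  have hdrop : w.drop (k+1) = '\n' :: t := by
    rw [← List.tail_drop, ← ht]; rfl
  have hpre : ['\n'] <+: w.drop (k+1) := ⟨t, by rw [hdrop]; rfl⟩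
  have hwk1 : w[k+1]? = some '\n' := (pvSingleton_prefix_iff w '\n' (k+1)).mp hpre
  have hlt : k + 1 < w.length := (List.getElem?_eq_some_iff.mp hwk1).1
  have hge := pvGo_ge w ['\n'] w.length (k+1) (le_of_lt hlt) hpre
  have hgo1 : PySem.Chars.rfind w ['\n'] = PySem.Chars.rfind.go w ['\n'] w.length := rfl
  rw [← hgo1] at hge
  have hr1 : PySem.Chars.rfind w ['\n'] ≠ -1 := by omega
  rw [if_neg hr1]
  refine ⟨by omega, ?_⟩
  rw [hgo, hk1]
  push_cast at hge ⊢
  omega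

theorem pvAdvanceJ_ge (nls : List Int) (e : Int) (j : Nat) : j ≤ pvAdvanceJ nls e j := by
  fun_induction pvAdvanceJ <;> omega

theorem pvAdvanceJ_le (nls : List Int) (e : Int) (j : Nat) (h : j ≤ nls.length) :
    pvAdvanceJ nls e j ≤ nls.length := by
  fun_induction pvAdvanceJ <;> omega

theorem pvAdvanceJ_scanned (nls : List Int) (e : Int) (j : Nat) :
    ∀ k, j ≤ k → k < pvAdvanceJ nls e j → nls.getD k 0 < e := by
  fun_induction pvAdvanceJ with
  | case1 j h ih =>
    intro k hk1 hk2
    rcases Nat.eq_or_lt_of_le hk1 with rfl | h2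
    · exact h.2
    · exact ih k h2 hk2
  | case2 j h => intro k hk1 hk2; omega

theorem pvAdvanceJ_stop (nls : List Int) (e : Int) (j : Nat)
    (h : pvAdvanceJ nls e j < nls.length) : e ≤ nls.getD (pvAdvanceJ nls e j) 0 := by
  fun_induction pvAdvanceJ with
  | case1 j h' ih => exact ih h
  | case2 j h' => by_contra hc; exact h' ⟨h, by omega⟩

theorem pvMem_nls (cs : List Char) (x : Int) :
    x ∈ pvNls cs ↔ ∃ k : Nat, x = (k:Int) ∧ cs[k]? = some '\n' := by
  simp [pvNls, List.mem_filter, PySem.List.mem_enumerate_iff]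
  constructor
  · rintro ⟨k, rfl, hk, hv⟩
    exact ⟨k, rfl, by simp [List.getElem?_eq_some_iff]; exact ⟨hk, hv⟩⟩
  · rintro ⟨k, rfl, hnl⟩
    obtain ⟨hk, hv⟩ := List.getElem?_eq_some_iff.mp hnl
    exact ⟨k, rfl, hk, hv⟩

theorem pvNls_sorted (cs : List Char) : (pvNls cs).Pairwise (· < ·) := by
  have h1 := PySem.List.pairwise_lt_enumerate (xs := cs) (s := 0)
  exact List.Pairwise.map _ (fun a b h => h) (h1.filter _)

theorem pvNls_spec (cs : List Char) (k : Nat) (hk : k < (pvNls cs).length) :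
    ∃ p : Nat, (pvNls cs).getD k 0 = (p:Int) ∧ cs[p]? = some '\n' := by
  have hm : (pvNls cs).getD k 0 ∈ pvNls cs := by
    rw [List.getD_eq_getElem _ _ hk]; exact List.getElem_mem hk
  obtain ⟨p, hp1, hp2⟩ := (pvMem_nls cs _).mp hm
  exact ⟨p, hp1, hp2⟩

theorem pvNls_mono (cs : List Char) (k k' : Nat) (h : k < k') (hk' : k' < (pvNls cs).length) :
    (pvNls cs).getD k 0 < (pvNls cs).getD k' 0 := by
  have hs := List.pairwise_iff_getElem.mp (pvNls_sorted cs)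
  have := hs k k' (lt_trans h hk') hk' h
  rwa [List.getD_eq_getElem _ _ (lt_trans h hk'), List.getD_eq_getElem _ _ hk']

theorem pvNls_idx (cs : List Char) (q : Nat) (hq : cs[q]? = some '\n') :
    ∃ k : Nat, k < (pvNls cs).length ∧ (pvNls cs).getD k 0 = (q:Int) := by
  have hm : (q:Int) ∈ pvNls cs := (pvMem_nls cs _).mpr ⟨q, rfl, hq⟩
  obtain ⟨k, hk, he⟩ := List.mem_iff_getElem.mp hm
  exact ⟨k, hk, by rwa [List.getD_eq_getElem _ _ hk]⟩

theorem pvMax1 (a : Int) : PySem.List.max? [a] id = some a := by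
  simp [PySem.List.max?]

theorem pvMax2 (a c : Int) (hac : a < c) : PySem.List.max? [a, c] id = some c := by
  simp only [PySem.List.max?, List.foldl, id]
  split_ifs <;> simp_all <;> omega

theorem pvMax3 (a b c : Int) (hac : a < c) (hbc : b < c) :
    PySem.List.max? [a, b, c] id = some c := by
  simp only [PySem.List.max?, List.foldl, id]
  split_ifs <;> simp_all <;> omega

theorem pvEndA_eq (cs : List Char) (start e0 : Int) (h0 : 0 ≤ start) (hse : start ≤ e0)
    (hen : e0 ≤ (cs.length : Int)) :
    pvEndA cs start e0 =
      (if start < PySem.Chars.rfindFrom cs ['\n'] start (some e0) then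
        PySem.Chars.rfindFrom cs ['\n'] start (some e0) + 1 else e0) := by
  set c1 := PySem.Chars.rfindFrom cs [';', '\n'] start (some e0) with hc1d
  set c2 := PySem.Chars.rfindFrom cs ['}', '\n'] start (some e0) with hc2d
  set c3 := PySem.Chars.rfindFrom cs ['\n'] start (some e0) with hc3d
  by_cases hc3 : c3 = -1
  · have hc1 : c1 = -1 := by
      by_contra hc; exact absurd hc3 (pvTwo_lt cs ';' start e0 h0 hse hen hc).1
    have hc2 : c2 = -1 := by
      by_contra hc; exact absurd hc3 (pvTwo_lt cs '}' start e0 h0 hse hen hc).1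
    have hv : ([c1, c2, c3].filter (fun p => !(p == -1))) = [] := by
      simp [hc1, hc2, hc3]
    simp only [pvEndA, ← hc1d, ← hc2d, ← hc3d, hv]
    simp [pvMax1, hc3]
    omega
  · by_cases hc1 : c1 = -1 <;> by_cases hc2 : c2 = -1
    · have hv : ([c1, c2, c3].filter (fun p => !(p == -1))) = [c3] := by
        simp [hc1, hc2, hc3]
      simp only [pvEndA, ← hc1d, ← hc2d, ← hc3d, hv]
      simp [pvMax1]
    · have h2 := (pvTwo_lt cs '}' start e0 h0 hse hen hc2).2
      rw [← hc2d, ← hc3d] at h2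
      have hv : ([c1, c2, c3].filter (fun p => !(p == -1))) = [c2, c3] := by
        simp [hc1, hc2, hc3]
      simp only [pvEndA, ← hc1d, ← hc2d, ← hc3d, hv]
      simp [pvMax2 c2 c3 h2]
    · have h1 := (pvTwo_lt cs ';' start e0 h0 hse hen hc1).2
      rw [← hc1d, ← hc3d] at h1
      have hv : ([c1, c2, c3].filter (fun p => !(p == -1))) = [c1, c3] := by
        simp [hc1, hc2, hc3]
      simp only [pvEndA, ← hc1d, ← hc2d, ← hc3d, hv]
      simp [pvMax2 c1 c3 h1]
    · have h1 := (pvTwo_lt cs ';' start e0 h0 hse hen hc1).2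
      have h2 := (pvTwo_lt cs '}' start e0 h0 hse hen hc2).2
      rw [← hc1d, ← hc3d] at h1
      rw [← hc2d, ← hc3d] at h2
      have hv : ([c1, c2, c3].filter (fun p => !(p == -1))) = [c1, c2, c3] := by
        simp [hc1, hc2, hc3]
      simp only [pvEndA, ← hc1d, ← hc2d, ← hc3d, hv]
      simp [pvMax3 c1 c2 c3 h1 h2]


theorem pvEnd_eq (cs : List Char) (start e0 : Int) (j : Nat)
    (h0 : 0 ≤ start) (hse : start < e0) (hen : e0 ≤ (cs.length : Int))
    (hj : j ≤ (pvNls cs).length)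
    (hlo : ∀ k, k < j → (pvNls cs).getD k 0 < start) :
    pvEndA cs start e0 = pvEndB (pvNls cs) start e0 (pvAdvanceJ (pvNls cs) e0 j) := by
  set j' := pvAdvanceJ (pvNls cs) e0 j with hj'd
  have hj'ge : j ≤ j' := hj'd ▸ pvAdvanceJ_ge (pvNls cs) e0 j
  have hj'le : j' ≤ (pvNls cs).length := hj'd ▸ pvAdvanceJ_le (pvNls cs) e0 j hj
  have hscan : ∀ k, j ≤ k → k < j' → (pvNls cs).getD k 0 < e0 :=
    hj'd ▸ pvAdvanceJ_scanned (pvNls cs) e0 j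
  have hstop : j' < (pvNls cs).length → e0 ≤ (pvNls cs).getD j' 0 :=
    fun h => hj'd ▸ pvAdvanceJ_stop (pvNls cs) e0 j (hj'd ▸ h)
  rw [pvEndA_eq cs start e0 h0 (le_of_lt hse) hen]
  set c3 := PySem.Chars.rfindFrom cs ['\n'] start (some e0) with hc3d
  by_cases hcond : 0 < j' ∧ start < (pvNls cs).getD (j'-1) 0
  · obtain ⟨hj0, hgt⟩ := hcond
    have hjj : j ≤ j' - 1 := by
      by_contra hc
      exact absurd (hlo (j'-1) (by omega)) (by omega)
    have hlt : (pvNls cs).getD (j'-1) 0 < e0 := hscan (j'-1) hjj (by omega)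
    obtain ⟨p, hp1, hp2⟩ := pvNls_spec cs (j'-1) (by omega)
    have hc3ne : c3 ≠ -1 := by
      intro hc
      exact pvNl_neg cs start e0 h0 (le_of_lt hse) hen (hc3d ▸ hc) p (by omega) (by omega) hp2
    obtain ⟨pm, hm1, hm2, hm3, hm4, hm5⟩ :=
      pvNl_pos cs start e0 h0 (le_of_lt hse) hen (hc3d ▸ hc3ne)
    rw [← hc3d] at hm1
    have hpm : pm = p := by
      by_cases hple : pm < p
      · exact absurd hm5 (by push Not; exact ⟨p, by omega, by omega, hp2⟩)
      · by_contra hne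
        have hplt : p < pm := by omega
        obtain ⟨km, hkm1, hkm2⟩ := pvNls_idx cs pm hm4
        have hkmge : j' ≤ km := by
          by_contra hc
          have hle2 : (pvNls cs).getD km 0 ≤ (pvNls cs).getD (j'-1) 0 := by
            rcases Nat.eq_or_lt_of_le (by omega : km ≤ j'-1) with heq | hlt2
            · rw [heq]
            · exact le_of_lt (pvNls_mono cs km (j'-1) hlt2 (by omega))
          omega
        have hge2 : e0 ≤ (pvNls cs).getD km 0 := by
          rcases Nat.eq_or_lt_of_le hkmge with heq | hlt2
          · rw [← heq]; exact hstop (heq ▸ hkm1)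
          · exact le_trans (hstop (by omega)) (le_of_lt (pvNls_mono cs j' km hlt2 hkm1))
        omega
    rw [if_pos (by omega : start < c3)]
    rw [pvEndB, if_pos ⟨hj0, hgt⟩]
    omega
  · rw [pvEndB, if_neg hcond]
    rw [if_neg ?_]
    by_cases hc3 : c3 = -1
    · rw [hc3]; omega
    · obtain ⟨pm, hm1, hm2, hm3, hm4, hm5⟩ :=
        pvNl_pos cs start e0 h0 (le_of_lt hse) hen (hc3d ▸ hc3)
      rw [← hc3d] at hm1
      intro hlt
      have hpmgt : start < (pm:Int) := by omega
      obtain ⟨km, hkm1, hkm2⟩ := pvNls_idx cs pm hm4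
      have hkmlt : km < j' := by
        by_contra hc
        have hge2 : e0 ≤ (pvNls cs).getD km 0 := by
          rcases Nat.eq_or_lt_of_le (by omega : j' ≤ km) with heq | hlt2
          · rw [← heq]; exact hstop (heq ▸ hkm1)
          · exact le_trans (hstop (by omega)) (le_of_lt (pvNls_mono cs j' km hlt2 hkm1))
        omega
      apply hcond
      refine ⟨by omega, ?_⟩
      have hle2 : (pvNls cs).getD km 0 ≤ (pvNls cs).getD (j'-1) 0 := by
        rcases Nat.eq_or_lt_of_le (by omega : km ≤ j'-1) with heq | hlt2
        · rw [heq]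
        · exact le_of_lt (pvNls_mono cs km (j'-1) hlt2 (by omega))
      omega


theorem pvLoopA_stop (cs : List Char) (maxs start : Int) (fuel : Nat) (chunks : List (List Char))
    (h : (cs.length : Int) ≤ start) : pvLoopA cs maxs fuel start chunks = chunks := by
  cases fuel with
  | zero => rfl
  | succ f => rw [pvLoopA, if_neg (by omega : ¬ start < (cs.length:Int))]

theorem pvLoopB_stop (cs : List Char) (maxs start : Int) (nls : List Int) (fuel j : Nat)
    (chunks : List (List Char)) (h : (cs.length : Int) ≤ start) :
    pvLoopB cs maxs nls fuel start j chunks = chunks := by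
  cases fuel with
  | zero => rfl
  | succ f => rw [pvLoopB, if_neg (by omega : ¬ start < (cs.length:Int))]

theorem pvLoop_eq (cs : List Char) (maxs : Int) (hm : 1 ≤ maxs) :
    ∀ (fuel : Nat) (start : Int) (j : Nat) (chunks : List (List Char)),
      0 ≤ start → j ≤ (pvNls cs).length →
      (∀ k, k < j → (pvNls cs).getD k 0 < start) →
      pvLoopA cs maxs fuel start chunks = pvLoopB cs maxs (pvNls cs) fuel start j chunks := by
  intro fuel
  induction fuel with
  | zero => intro start j chunks _ _ _; rfl
  | succ fuel ih =>
    intro start j chunks h0 hj hlo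
    by_cases hstart : start < (cs.length : Int)
    · rw [pvLoopA, pvLoopB]
      simp only [if_pos hstart]
      have hse : start < min (start + maxs) (cs.length : Int) := by omega
      have hen : min (start + maxs) (cs.length : Int) ≤ (cs.length : Int) := by omega
      by_cases hend : min (start + maxs) (cs.length : Int) < (cs.length : Int)
      · simp only [if_pos hend]
        set e0 := min (start + maxs) (cs.length : Int) with he0d
        set j' := pvAdvanceJ (pvNls cs) e0 j with hj'd
        have hEnd := pvEnd_eq cs start e0 j h0 hse hen hj hlo
        rw [← hj'd] at hEnd
        rw [hEnd]
        set e := pvEndB (pvNls cs) start e0 j' with hed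
        have hj'ge : j ≤ j' := hj'd ▸ pvAdvanceJ_ge (pvNls cs) e0 j
        have hj'le : j' ≤ (pvNls cs).length := hj'd ▸ pvAdvanceJ_le (pvNls cs) e0 j hj
        have hscan : ∀ k, j ≤ k → k < j' → (pvNls cs).getD k 0 < e0 :=
          hj'd ▸ pvAdvanceJ_scanned (pvNls cs) e0 j
        have he_pos : start < e := by
          rw [hed, pvEndB]; split_ifs with hc
          · omega
          · omega
        have hlo' : ∀ k, k < j' → (pvNls cs).getD k 0 < e := by
          intro k hk
          rw [hed, pvEndB]; split_ifs with hc
          · rcases Nat.eq_or_lt_of_le (by omega : k ≤ j'-1) with heq | hlt2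
            · rw [heq]; omega
            · have := pvNls_mono cs k (j'-1) hlt2 (by omega); omega
          · rcases Nat.lt_or_ge k j with hkj | hkj
            · have := hlo k hkj; omega
            · exact hscan k hkj hk
        exact ih e j' _ (by omega) hj'le hlo'
      · simp only [if_neg hend]
        have he0 : min (start + maxs) (cs.length : Int) = (cs.length : Int) := by omega
        rw [he0, pvLoopA_stop cs maxs _ fuel _ (le_refl _),
          pvLoopB_stop cs maxs _ _ fuel j _ (le_refl _)]
    · rw [pvLoopA, pvLoopB]
      simp only [if_neg hstart]

-- ===== VERDICT (by name: the statement is the Claim_ definition above) =====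
theorem split_at_statement_boundaries_spec : Claim_equal_split_at_statement_boundaries := by
  unfold Claim_equal_split_at_statement_boundaries
  intro text maxs hdom hpre
  unfold Spec_split_at_statement_boundaries
  unfold split_at_statement_boundaries split_at_statement_boundaries_alt
  simp only
  by_cases hle : (PySem.Chars.len text.toList : Int) ≤ maxs
  · rw [if_pos hle, if_pos hle]
  · rw [if_neg hle, if_neg hle]
    rcases hpre with hm | htext
    · exact congrArg _ (pvLoop_eq text.toList maxs hm (text.toList.length+1) 0 0 []
        (le_refl 0) (Nat.zero_le _) (fun k hk => absurd hk (Nat.not_lt_zero k)))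
    · subst htext
      simp [pvLoopA, pvLoopB]
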